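-- pv_equiv track=rewrite | github.com/NatKat10/EvoGenes | backend/app/routes.py | normalize_exons
-- ===== SOURCE A (Python) =====
-- def reverse_negative_strand_exons(exon_intervals):
--     if not exon_intervals:
--         return []
--
--     # Sort the exon intervals by their start position to ensure they are in the correct order
--     sorted_intervals = sorted(exon_intervals, key=lambda x: x[0])
--
--     # Calculate total gene length
--     # Determine the start and end of the entire gene based on the sorted exons
--     gene_start = sorted_intervals[0][0]
--     gene_end = sorted_intervals[-1][1]
--     gene_length = gene_end - gene_start
--
--     # Calculate the sizes of each exon (difference between start and end positions)
--     exon_sizes = [end - start for start, end in sorted_intervals]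
--     # Calculate the distances between consecutive exons (inter-exon distances)
--     inter_exon_distances = [sorted_intervals[i+1][0] - sorted_intervals[i][1] for i in range(len(sorted_intervals) - 1)]
--
--     # Reverse the order of exon sizes and inter-exon distances to reflect the negative strand
--     reversed_sizes = exon_sizes[::-1]
--     reversed_distances = inter_exon_distances[::-1]
--
--     # Reconstruct the reversed exons by iterating through the reversed sizes and distances
--     reversed_exons = []
--     current_start = gene_start
--     for i, size in enumerate(reversed_sizes):
--         exon_end = current_start + size# Calculate the end position of the current exon
--         reversed_exons.append((current_start, exon_end))# Add the reversed exon to the list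
--         if i < len(reversed_distances):# If there are more distances, update the start position for the next exon
--             current_start = exon_end + reversed_distances[i]
--     # Return the list of reversed exons
--     return reversed_exons
--
-- def normalize_exons(exon_intervals, min_val):
--     normalized_intervals = {}
--     # Iterate over each parent transcript and its associated strand value and exon intervals
--     for parent, (strand_value, intervals) in exon_intervals.items():
--         # Find the minimum start position and maximum end position of the exons for this parent
--         min_start = min(start for start, end in intervals)
--         max_end = max(end for start, end in intervals)
--         # Normalize the exon intervals by shifting them to start at the provided min_val
--         normalized = [(min_val + (start - min_start), end - min_start + min_val) for start, end in intervals]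
--          # If the strand is negative (strand_value == -1), reverse the normalized exons
--         if strand_value == -1:
--             normalized = reverse_negative_strand_exons(normalized)
--         # Store the normalized (and possibly reversed) intervals in the dictionary, keyed by the parent transcript ID
--         normalized_intervals[parent] = normalized
--     return normalized_intervals
-- ===== SOURCE B (Python) =====
-- def normalize_exons(exon_intervals, min_val):
--     result = {}
--     for parent, (strand_value, intervals) in exon_intervals.items():
--         # shift so the leftmost exon starts at min_val
--         min_start = min(start for start, end in intervals)
--         normalized = [(min_val + start - min_start, min_val + end - min_start)
--                       for start, end in intervals]
--         if strand_value == -1: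
--             # reflect the sorted exons about the gene's span, walking them back to front
--             srt = sorted(normalized, key=lambda x: x[0])
--             g = srt[0][0] + srt[-1][1]
--             normalized = [(g - end, g - start) for start, end in reversed(srt)]
--         result[parent] = normalized
--     return result
-- ===== Notes on version B (the rewrite author's own statement) =====
-- stated objective: simpler
-- what changed: reverse_negative_strand_exons's exon-size/inter-exon-gap decomposition plus accumulate-from-reversed-sizes reconstruction is replaced by a direct closed-form reflection: walk the sorted exons back to front and map (start, end) to (gene_start + gene_end - end, gene_start + gene_end - start); the dead max_end computation is dropped.
import Mathlib
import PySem

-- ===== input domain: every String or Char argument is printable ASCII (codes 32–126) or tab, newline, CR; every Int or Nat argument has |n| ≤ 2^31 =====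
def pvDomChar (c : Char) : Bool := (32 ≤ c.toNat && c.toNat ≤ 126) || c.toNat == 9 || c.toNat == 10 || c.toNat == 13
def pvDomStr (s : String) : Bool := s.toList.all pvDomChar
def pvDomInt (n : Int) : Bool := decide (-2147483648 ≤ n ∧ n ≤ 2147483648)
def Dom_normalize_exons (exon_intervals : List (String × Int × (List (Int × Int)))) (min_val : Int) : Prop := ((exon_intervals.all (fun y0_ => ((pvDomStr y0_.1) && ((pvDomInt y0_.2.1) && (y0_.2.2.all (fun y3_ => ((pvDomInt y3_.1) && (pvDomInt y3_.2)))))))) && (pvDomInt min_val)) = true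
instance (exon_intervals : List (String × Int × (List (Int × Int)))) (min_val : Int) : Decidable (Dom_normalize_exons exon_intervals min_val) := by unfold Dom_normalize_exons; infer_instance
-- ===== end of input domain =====

-- B replaces A's exon-size/gap decomposition and accumulate loop by a direct reflection
-- of the sorted exons about the gene span, iterated back to front (objective: simpler).


-- ===== PORT A =====
-- [sorted[i+1][0] - sorted[i][1] for i in range(n-1)]: consecutive-pair recursion, exact
def pyInterExonDistances : List (Int × Int) → List Int
  | a :: b :: t => (b.1 - a.2) :: pyInterExonDistances (b :: t)
  | _ => []

-- A's reconstruction loop: enumerate(reversed_sizes) with 'if i < len(reversed_distances)';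
-- sizes and distances are consumed in lockstep, so 'i < len' = the distance list is nonempty here (exact)
def pyReconstruct (cur : Int) : List Int → List Int → List (Int × Int)
  | [], _ => []
  | sz :: rest, dists =>
      (cur, cur + sz) :: pyReconstruct (cur + sz + dists.headD 0) rest dists.tail

def reverse_negative_strand_exons (exon_intervals : List (Int × Int)) : List (Int × Int) :=
  if exon_intervals = [] then []
  else
    let sorted_intervals := PySem.List.sorted exon_intervals (fun x => x.1) false
    -- sorted_intervals is nonempty here, so [0] = headD and [-1] = getLastD (exact)
    let gene_start := (sorted_intervals.headD (0, 0)).1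
    let gene_end := (sorted_intervals.getLastD (0, 0)).2
    let _gene_length := gene_end - gene_start
    let exon_sizes := sorted_intervals.map (fun p => p.2 - p.1)
    let inter_exon_distances := pyInterExonDistances sorted_intervals
    let reversed_sizes := exon_sizes.reverse          -- xs[::-1]
    let reversed_distances := inter_exon_distances.reverse
    pyReconstruct gene_start reversed_sizes reversed_distances

def normalize_exons (exon_intervals : List (String × Int × (List (Int × Int)))) (min_val : Int) : List (String × List (Int × Int)) :=
  (exon_intervals.foldl (fun d ent =>
    let parent := ent.1
    let strand_value := ent.2.1
    let intervals := ent.2.2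
    -- min()/max() raise ValueError on an empty sequence; Pre_ excludes empty interval lists
    let min_start := ((PySem.List.min? (intervals.map (fun p => p.1)) (fun x => x)).getD 0)
    let _max_end := ((PySem.List.max? (intervals.map (fun p => p.2)) (fun x => x)).getD 0)
    let normalized := intervals.map (fun p => (min_val + (p.1 - min_start), p.2 - min_start + min_val))
    let normalized := if strand_value = -1 then reverse_negative_strand_exons normalized else normalized
    d.insert parent normalized) (PySem.Dict.empty : PySem.Dict String (List (Int × Int)))).items

-- ===== PORT B =====
def reflect_negative_strand_exons (normalized : List (Int × Int)) : List (Int × Int) :=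
  let srt := PySem.List.sorted normalized (fun x => x.1) false
  -- srt[0]/srt[-1]: inside Pre_ the list is nonempty, so headD/getLastD are exact
  let g := (srt.headD (0, 0)).1 + (srt.getLastD (0, 0)).2
  srt.reverse.map (fun p => (g - p.2, g - p.1))

def normalize_exons_alt (exon_intervals : List (String × Int × (List (Int × Int)))) (min_val : Int) : List (String × List (Int × Int)) :=
  (exon_intervals.foldl (fun d ent =>
    let parent := ent.1
    let strand_value := ent.2.1
    let intervals := ent.2.2
    let min_start := ((PySem.List.min? (intervals.map (fun p => p.1)) (fun x => x)).getD 0)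
    let normalized := intervals.map (fun p => (min_val + p.1 - min_start, min_val + p.2 - min_start))
    let normalized := if strand_value = -1 then reflect_negative_strand_exons normalized else normalized
    d.insert parent normalized) (PySem.Dict.empty : PySem.Dict String (List (Int × Int)))).items

-- ===== PRECONDITION & SPEC =====
-- Pre_ excludes inputs where some transcript has an EMPTY interval list: there min() raises ValueError in A (and in B).
def Pre_normalize_exons (exon_intervals : List (String × Int × (List (Int × Int)))) (min_val : Int) : Prop :=
  ∀ e ∈ exon_intervals, e.2.2 ≠ []
instance (exon_intervals : List (String × Int × (List (Int × Int)))) (min_val : Int) : Decidable (Pre_normalize_exons exon_intervals min_val) := by unfold Pre_normalize_exons; infer_instance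
def pvWitness_normalize_exons : (List (String × Int × (List (Int × Int)))) × Int :=
  ([("t1", (-1, [(3, 5), (0, 2)])), ("t2", (1, [(0, 4)]))], 10)

def Spec_normalize_exons (exon_intervals : List (String × Int × (List (Int × Int)))) (min_val : Int) (out : List (String × List (Int × Int))) : Prop := out = normalize_exons_alt exon_intervals min_val
instance (exon_intervals : List (String × Int × (List (Int × Int)))) (min_val : Int) (out : List (String × List (Int × Int))) : Decidable (Spec_normalize_exons exon_intervals min_val out) := by unfold Spec_normalize_exons; infer_instance

-- ===== CLAIM (what is proved, stated in full; the proofs are below) =====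
def Claim_equal_normalize_exons : Prop := ∀ (exon_intervals : List (String × Int × (List (Int × Int)))) (min_val : Int), Dom_normalize_exons exon_intervals min_val → Pre_normalize_exons exon_intervals min_val → Spec_normalize_exons exon_intervals min_val (normalize_exons exon_intervals min_val)

-- ===== LEMMAS AND PROOFS =====

-- inter-exon gaps read off the REVERSED sorted list: for x before y in the reversed list, gap = x.1 - y.2
def rGaps : List (Int × Int) → List Int
  | b :: a :: t => (b.1 - a.2) :: rGaps (a :: t)
  | _ => []

theorem rGaps_append_pair (r : List (Int × Int)) (c a : Int × Int) :
    rGaps (r ++ [c, a]) = rGaps (r ++ [c]) ++ [c.1 - a.2] := by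
  induction r with
  | nil => simp [rGaps]
  | cons x r ih =>
      cases r with
      | nil => simp [rGaps]
      | cons y r' => simpa [rGaps] using ih

theorem gaps_reverse (l : List (Int × Int)) :
    (pyInterExonDistances l).reverse = rGaps l.reverse := by
  induction l with
  | nil => simp [pyInterExonDistances, rGaps]
  | cons a tail ih =>
      cases tail with
      | nil => simp [pyInterExonDistances, rGaps]
      | cons b t =>
          have hb : (b :: t).reverse = t.reverse ++ [b] := by simp
          calc (pyInterExonDistances (a :: b :: t)).reverse
              = (pyInterExonDistances (b :: t)).reverse ++ [b.1 - a.2] := by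
                simp [pyInterExonDistances]
            _ = rGaps (t.reverse ++ [b]) ++ [b.1 - a.2] := by rw [ih, hb]
            _ = rGaps ((t.reverse ++ [b]) ++ [a]) := by
                rw [show (t.reverse ++ [b]) ++ [a] = t.reverse ++ [b, a] by simp,
                  rGaps_append_pair]
            _ = rGaps ((a :: b :: t).reverse) := by simp

theorem reconstruct_eq_reflect_core :
    ∀ (rest : List (Int × Int)) (b : Int × Int) (cur : Int),
      pyReconstruct cur ((b :: rest).map (fun p => p.2 - p.1)) (rGaps (b :: rest))
        = (b :: rest).map (fun p => (cur + b.2 - p.2, cur + b.2 - p.1)) := by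
  intro rest
  induction rest with
  | nil =>
      intro b cur
      simp only [List.map_cons, List.map_nil, rGaps, pyReconstruct, List.cons.injEq,
        Prod.mk.injEq]
      refine ⟨⟨by ring, by ring⟩, trivial⟩
  | cons a t ih =>
      intro b cur
      have h := ih a (cur + b.2 - a.2)
      simp only [List.map_cons, pyReconstruct] at h
      simp only [List.map_cons, rGaps, pyReconstruct, List.headD_cons, List.tail_cons]
      rw [show cur + (b.2 - b.1) + (b.1 - a.2) = cur + b.2 - a.2 from by ring]
      injection h with h1 h2
      rw [h2]
      simp only [List.cons.injEq, Prod.mk.injEq]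
      and_intros
      case _ => first | trivial | ring
      case _ => first | trivial | ring
      case _ => first | trivial | ring
      case _ => first | trivial | ring
      case _ =>
        apply List.map_congr_left
        intro p _
        simp only [Prod.mk.injEq]
        constructor <;> ring

theorem reverse_eq_reflect (xs : List (Int × Int)) :
    reverse_negative_strand_exons xs = reflect_negative_strand_exons xs := by
  by_cases hx : xs = []
  · subst hx; rfl
  · unfold reverse_negative_strand_exons reflect_negative_strand_exons
    rw [if_neg hx]
    have hs : PySem.List.sorted xs (fun x => x.1) false ≠ [] := by
      simpa [PySem.List.sorted_eq_nil_iff] using hx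
    obtain ⟨init, lastEl, hconc⟩ := (List.eq_nil_or_concat (PySem.List.sorted xs (fun x => x.1) false)).resolve_left hs
    rw [List.concat_eq_append] at hconc
    rw [hconc]
    dsimp only
    have hrev : (init ++ [lastEl]).reverse = lastEl :: init.reverse := by simp
    have hlast : (init ++ [lastEl]).getLastD (0, 0) = lastEl := by simp
    rw [gaps_reverse, ← List.map_reverse, hrev,
      reconstruct_eq_reflect_core init.reverse lastEl ((init ++ [lastEl]).headD (0, 0)).1,
      hlast]

theorem foldl_entry_ext {α β : Type} (f g : β → α → β) (l : List α) (d : β)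
    (h : ∀ d x, f d x = g d x) : l.foldl f d = l.foldl g d := by
  induction l generalizing d with
  | nil => rfl
  | cons x t ih => simp only [List.foldl_cons, h]; exact ih _

theorem entry_fun_eq (min_val : Int) (d : PySem.Dict String (List (Int × Int)))
    (ent : String × Int × (List (Int × Int))) :
      (let parent := ent.1
       let strand_value := ent.2.1
       let intervals := ent.2.2
       let min_start := ((PySem.List.min? (intervals.map (fun p => p.1)) (fun x => x)).getD 0)
       let _max_end := ((PySem.List.max? (intervals.map (fun p => p.2)) (fun x => x)).getD 0)
       let normalized := intervals.map (fun p => (min_val + (p.1 - min_start), p.2 - min_start + min_val))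
       let normalized := if strand_value = -1 then reverse_negative_strand_exons normalized else normalized
       d.insert parent normalized)
      = (let parent := ent.1
         let strand_value := ent.2.1
         let intervals := ent.2.2
         let min_start := ((PySem.List.min? (intervals.map (fun p => p.1)) (fun x => x)).getD 0)
         let normalized := intervals.map (fun p => (min_val + p.1 - min_start, min_val + p.2 - min_start))
         let normalized := if strand_value = -1 then reflect_negative_strand_exons normalized else normalized
         d.insert parent normalized) := by
  simp only
  congr 1
  have hmap : ent.2.2.map (fun p => (min_val + (p.1 - ((PySem.List.min? (ent.2.2.map (fun p => p.1)) (fun x => x)).getD 0)), p.2 - ((PySem.List.min? (ent.2.2.map (fun p => p.1)) (fun x => x)).getD 0) + min_val))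
      = ent.2.2.map (fun p => (min_val + p.1 - ((PySem.List.min? (ent.2.2.map (fun p => p.1)) (fun x => x)).getD 0), min_val + p.2 - ((PySem.List.min? (ent.2.2.map (fun p => p.1)) (fun x => x)).getD 0))) := by
    apply List.map_congr_left; intro p _
    simp only [Prod.mk.injEq]; constructor <;> ring
  rw [hmap, reverse_eq_reflect]

-- ===== VERDICT (by name: the statement is the Claim_ definition above) =====
theorem normalize_exons_spec : Claim_equal_normalize_exons := by
  intro exon_intervals min_val _ _
  unfold Spec_normalize_exons normalize_exons normalize_exons_alt
  congr 1
  apply foldl_entry_ext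
  intro d ent
  exact entry_fun_eq min_val d ent
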